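-- pv_equiv track=rewrite | github.com/QWE-CXZ/LESS_ | recipe/less/revise_advantage.py | is_continuous_subsequence
-- ===== SOURCE A (Python) =====
-- def is_continuous_subsequence(sub, main):
--     len_sub = len(sub)
--     len_main = len(main)
--     if len_sub > len_main:
--         return False
--     for i in range(len_main - len_sub + 1):
--         if main[i:i + len_sub] == sub:
--             return True
--     return False
-- ===== SOURCE B (Python) =====
-- def is_continuous_subsequence(sub, main):
--     # Walk a start index over main and test sub element-wise at that index,
--     # instead of materialising a slice per position.
--     def _matches_at(sub, main, i):
--         if i + len(sub) > len(main):
--             return False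
--         for j, x in enumerate(sub):
--             if main[i + j] != x:
--                 return False
--         return True
--     i = 0
--     while True:
--         if _matches_at(sub, main, i):
--             return True
--         if i >= len(main):
--             return False
--         i += 1
-- ===== Notes on version B (the rewrite author's own statement) =====
-- stated objective: alternative
-- what changed: B replaces A's index loop that builds and compares a fresh slice main[i:i+len(sub)] at each position by a suffix-peeling loop with an element-wise prefix test (no slice construction, early exit on the first mismatching element).
import Mathlib
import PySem

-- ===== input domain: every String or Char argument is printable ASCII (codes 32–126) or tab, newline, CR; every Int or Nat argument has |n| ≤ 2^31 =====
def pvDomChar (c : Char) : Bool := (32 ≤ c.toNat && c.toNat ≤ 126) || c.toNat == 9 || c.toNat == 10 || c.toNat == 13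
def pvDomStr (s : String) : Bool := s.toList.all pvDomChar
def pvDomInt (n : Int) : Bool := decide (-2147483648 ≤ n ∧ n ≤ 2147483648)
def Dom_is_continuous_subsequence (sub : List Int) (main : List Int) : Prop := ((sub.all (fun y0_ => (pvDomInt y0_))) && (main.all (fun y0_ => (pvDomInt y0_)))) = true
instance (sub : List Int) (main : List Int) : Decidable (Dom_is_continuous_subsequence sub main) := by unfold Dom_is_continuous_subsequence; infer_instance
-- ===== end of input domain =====

-- B replaces A's slice-per-index loop by an index walk with an element-wise match test (no slice construction); alternative decomposition, same asymptotics.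

-- ===== PORT A =====
-- the 'for i in range(...)' loop with its early 'return True'
def pvALoop (sub : List Int) (main : List Int) : List Int → Bool
  | [] => false
  | i :: rest =>
      if PySem.List.slice main (some i) (some (i + (sub.length : Int))) = sub then true
      else pvALoop sub main rest

def is_continuous_subsequence (sub : List Int) (main : List Int) : Bool :=
  let len_sub : Int := sub.length
  let len_main : Int := main.length
  if len_sub > len_main then false
  else pvALoop sub main (PySem.List.pyRange 0 (len_main - len_sub + 1) 1)

-- ===== PORT B =====
-- the 'for j, x in enumerate(sub)' loop of _matches_at; the guard of _matches_at
-- guarantees i + j is in range, so main[i + j] is List.getD (never out of range here)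
def pvCmp (main : List Int) (i : Nat) : List Int → Nat → Bool
  | [], _ => true
  | x :: s, j => if main.getD (i + j) 0 ≠ x then false else pvCmp main i s (j + 1)

-- _matches_at(sub, main, i)
def pvMatchesAt (sub main : List Int) (i : Nat) : Bool :=
  if i + sub.length > main.length then false
  else pvCmp main i sub 0

-- the 'while True' loop over the start index i (i only ever moves 0 → main.length)
def pvBLoop (sub main : List Int) (i : Nat) : Bool :=
  if pvMatchesAt sub main i then true
  else if i ≥ main.length then false
  else pvBLoop sub main (i + 1)
termination_by main.length - i
decreasing_by omega

def is_continuous_subsequence_alt (sub : List Int) (main : List Int) : Bool :=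
  pvBLoop sub main 0

-- ===== PRECONDITION & SPEC =====
def Spec_is_continuous_subsequence (sub : List Int) (main : List Int) (out : Bool) : Prop := out = is_continuous_subsequence_alt sub main
instance (sub : List Int) (main : List Int) (out : Bool) : Decidable (Spec_is_continuous_subsequence sub main out) := by unfold Spec_is_continuous_subsequence; infer_instance

-- ===== CLAIM (what is proved, stated in full; the proofs are below) =====
def Claim_equal_is_continuous_subsequence : Prop := ∀ (sub : List Int) (main : List Int), Dom_is_continuous_subsequence sub main → Spec_is_continuous_subsequence sub main (is_continuous_subsequence sub main)

-- ===== LEMMAS AND PROOFS =====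

theorem pvCmp_iff (main : List Int) (i : Nat) (s : List Int) (j : Nat)
    (h : i + j + s.length ≤ main.length) :
    pvCmp main i s j = true ↔ s <+: main.drop (i + j) := by
  induction s generalizing j with
  | nil => simp [pvCmp]
  | cons x s ih =>
      have hlt : i + j < main.length := by simp at h; omega
      have hg : main.getD (i + j) 0 = main[i + j] := List.getD_eq_getElem _ _ hlt
      rw [List.drop_eq_getElem_cons hlt, List.cons_prefix_cons]
      simp only [pvCmp]
      split_ifs with hx
      · simp only [false_iff]
        intro hcon
        exact hx (hg.trans hcon.1.symm)
      · rw [not_ne_iff] at hx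
        have hrec := ih (j + 1) (by simp at h ⊢; omega)
        have harr : i + (j + 1) = i + j + 1 := by omega
        rw [hrec, harr]
        have hxv : x = main[i + j] := by rw [← hg]; exact hx.symm
        simp [hxv]

theorem pvMatchesAt_iff (sub main : List Int) (i : Nat) (hi : i ≤ main.length) :
    pvMatchesAt sub main i = true ↔ sub <+: main.drop i := by
  unfold pvMatchesAt
  split_ifs with h
  · simp only [false_iff]
    intro hcon
    have := hcon.length_le
    rw [List.length_drop] at this
    omega
  · have := pvCmp_iff main i sub 0 (by omega)
    simpa using this

theorem pvBLoop_iff (sub main : List Int) (i : Nat) (hi : i ≤ main.length) :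
    pvBLoop sub main i = true ↔ sub <:+: main.drop i := by
  rw [pvBLoop]
  by_cases hm : pvMatchesAt sub main i = true
  · simp only [hm, if_true, true_iff]
    exact ((pvMatchesAt_iff sub main i hi).1 hm).isInfix
  · rw [if_neg hm]
    rw [pvMatchesAt_iff sub main i hi] at hm
    by_cases hend : i ≥ main.length
    · have hdrop : main.drop i = [] := List.drop_eq_nil_of_le hend
      rw [if_pos hend, hdrop]
      rw [hdrop] at hm
      simp only [Bool.false_eq_true, false_iff, List.infix_nil]
      intro hcon; exact hm (hcon ▸ List.prefix_rfl)
    · push_neg at hend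
      rw [if_neg (by omega)]
      have ih := pvBLoop_iff sub main (i + 1) (by omega)
      rw [ih]
      have hsplit : main.drop i = main[i] :: main.drop (i + 1) :=
        List.drop_eq_getElem_cons hend
      rw [hsplit] at hm
      rw [hsplit, List.infix_cons_iff]
      tauto
termination_by main.length - i
decreasing_by omega

theorem pvALoop_iff (sub main : List Int) (L : List Int) :
    pvALoop sub main L = true ↔
      ∃ i ∈ L, PySem.List.slice main (some i) (some (i + (sub.length : Int))) = sub := by
  induction L with
  | nil => simp [pvALoop]
  | cons i rest ih =>
      simp only [pvALoop]
      split_ifs with h <;> simp [h, ih]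

theorem pvA_iff (sub main : List Int) :
    is_continuous_subsequence sub main = true ↔ sub <:+: main := by
  unfold is_continuous_subsequence
  simp only []
  split_ifs with hlen
  · simp only [false_iff]
    intro h
    have := h.length_le
    omega
  · rw [pvALoop_iff]
    constructor
    · rintro ⟨i, hi, hslice⟩
      rw [PySem.List.mem_pyRange_one] at hi
      obtain ⟨j, rfl⟩ := Int.eq_ofNat_of_zero_le hi.1
      rw [PySem.List.slice_natCast_add] at hslice
      calc sub = (main.drop j).take sub.length := hslice.symm
        _ <:+: main.drop j := List.take_prefix _ _ |>.isInfix
        _ <:+: main := (List.drop_suffix _ _).isInfix.trans List.infix_rfl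
    · rintro ⟨pre, post, rfl⟩
      refine ⟨(pre.length : Int), ?_, ?_⟩
      · rw [PySem.List.mem_pyRange_one]
        constructor
        · exact Int.natCast_nonneg _
        · simp only [List.length_append] at *
          push_cast
          omega
      · rw [PySem.List.slice_natCast_add]
        simp

theorem is_continuous_subsequence_eq (sub main : List Int) :
    is_continuous_subsequence sub main = is_continuous_subsequence_alt sub main := by
  unfold is_continuous_subsequence_alt
  rw [Bool.eq_iff_iff, pvA_iff, pvBLoop_iff sub main 0 (by omega)]
  simp

-- ===== VERDICT (by name: the statement is the Claim_ definition above) =====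
theorem is_continuous_subsequence_spec : Claim_equal_is_continuous_subsequence := by
  intro sub main _
  unfold Spec_is_continuous_subsequence
  exact is_continuous_subsequence_eq sub main
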